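-- pv_equiv track=rewrite | github.com/glykov/gb_intro_python | seminar_05/36.py | generate
-- ===== SOURCE A (Python) =====
-- def check(seq: list) -> bool:
--     n = len(seq)
--     if n < 2:
--         return False
--     for i in range(1, n):
--         if seq[i - 1] >= seq[i]:
--             return False
--     return True
--
-- def generate(lst: list) -> list:
--     width = len(lst)
--     n = 2 ** width
--     result = []
--
--     for i in range(n):
--         temp = []
--         for j in range(width):
--             if (i & (1 << j)):
--                 temp.append(lst[j])
--         if (check(temp)):
--             result.append(temp)
--     return result
-- ===== SOURCE B (Python) =====
-- def check(seq: list) -> bool: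
--     return len(seq) >= 2 and all(a < b for a, b in zip(seq, seq[1:]))
--
-- def generate(lst: list) -> list:
--     subsets = [[]]
--     for x in lst:
--         subsets = subsets + [s + [x] for s in subsets]
--     return [s for s in subsets if check(s)]
-- ===== Notes on version B (the rewrite author's own statement) =====
-- stated objective: alternative
-- what changed: Replaces the 2^n bitmask loop with inner bit-decoding passes by an incremental powerset build (the subset list is doubled once per element, preserving bitmask order) followed by a single filter with a zip-based strictly-increasing check.
import Mathlib
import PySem

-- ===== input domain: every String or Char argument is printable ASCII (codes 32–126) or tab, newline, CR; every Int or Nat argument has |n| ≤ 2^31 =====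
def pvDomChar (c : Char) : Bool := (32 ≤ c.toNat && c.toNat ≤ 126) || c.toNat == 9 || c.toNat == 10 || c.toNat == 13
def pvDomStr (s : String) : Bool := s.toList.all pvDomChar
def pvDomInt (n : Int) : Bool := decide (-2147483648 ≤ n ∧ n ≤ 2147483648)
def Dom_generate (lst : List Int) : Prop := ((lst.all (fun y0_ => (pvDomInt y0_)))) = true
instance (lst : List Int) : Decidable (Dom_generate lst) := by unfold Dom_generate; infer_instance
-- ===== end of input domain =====

-- B replaces the bitmask enumeration by an incremental powerset build (subsets doubled once per
-- element, then filtered); objective: alternative (a genuinely different construction, same cost class).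

-- ===== PORT A =====
-- check(seq): early-return loop over range(1, n)
def pvCheckLoop (seq : List Int) : List Int → Bool
  | [] => true
  | i :: rest =>
      if PySem.List.pyGetD seq (i - 1) 0 ≥ PySem.List.pyGetD seq i 0 then false
      else pvCheckLoop seq rest

def pvCheckA (seq : List Int) : Bool :=
  let n : Int := PySem.List.len seq
  if n < 2 then false
  else pvCheckLoop seq (PySem.List.pyRange 1 n 1)

-- inner loop of generate: temp accumulated by append over j in range(width)
def pvTemp (lst : List Int) (i : Int) : List Int :=
  (PySem.List.pyRange 0 (PySem.List.len lst) 1).foldl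
    (fun temp j =>
      if PySem.Int.band i ((1 : Int) <<< j) ≠ 0 then temp ++ [PySem.List.pyGetD lst j 0]
      else temp) []

-- width = len(lst) ≥ 0, so 'n = 2 ** width' is the Nat power cast to Int (exact here)
def generate (lst : List Int) : List (List Int) :=
  let width : Int := PySem.List.len lst
  let n : Int := (2 : Int) ^ width.toNat
  (PySem.List.pyRange 0 n 1).foldl
    (fun result i =>
      let temp := pvTemp lst i
      if pvCheckA temp then result ++ [temp] else result) []

-- ===== PORT B =====
def pvCheckB (seq : List Int) : Bool :=
  decide (2 ≤ seq.length) && (seq.zip seq.tail).all (fun p => decide (p.1 < p.2))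

def generate_alt (lst : List Int) : List (List Int) :=
  (lst.foldl (fun subsets x => subsets ++ subsets.map (fun s => s ++ [x])) [[]]).filter pvCheckB

-- ===== PRECONDITION & SPEC =====
def Spec_generate (lst : List Int) (out : List (List Int)) : Prop := out = generate_alt lst
instance (lst : List Int) (out : List (List Int)) : Decidable (Spec_generate lst out) := by unfold Spec_generate; infer_instance

-- ===== CLAIM (what is proved, stated in full; the proofs are below) =====
def Claim_equal_generate : Prop := ∀ (lst : List Int), Dom_generate lst → Spec_generate lst (generate lst)

-- ===== LEMMAS AND PROOFS =====

theorem pv_testBit_div (m k : Nat) : m.testBit k = decide (m / 2 ^ k % 2 = 1) := by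
  rw [Nat.testBit, Nat.shiftRight_eq_div_pow, Nat.land_comm, Nat.and_one_is_mod]
  cases h : m / 2 ^ k % 2 with
  | zero => simp
  | succ n => have : n = 0 := by omega
              subst this; simp

-- bit test: m & (1 << k) ≠ 0 ↔ testBit m k, for nonneg operands
theorem pv_bandBit (m k : Nat) :
    (PySem.Int.band (↑m) ((1 : Int) <<< (k : Int)) ≠ 0) ↔ m.testBit k = true := by
  have h1 : (1 : Int) <<< (k : Int) = ((1 <<< k : Nat) : Int) := by
    exact_mod_cast Int.shiftLeft_natCast 1 k
  rw [h1, PySem.Int.band_natCast, Nat.one_shiftLeft, Nat.and_two_pow]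
  cases h : m.testBit k <;> simp

theorem pv_tb_high {k w : Nat} (h : k < 2 ^ w) : (2 ^ w + k).testBit w = true := by
  rw [pv_testBit_div, Nat.add_comm, Nat.add_div_right _ (Nat.two_pow_pos w), Nat.div_eq_of_lt h]
  decide

theorem pv_tb_low {k w j : Nat} (hj : j < w) : (2 ^ w + k).testBit j = k.testBit j := by
  rw [pv_testBit_div, pv_testBit_div]
  have h2 : 2 ^ w = 2 ^ (w - j - 1) * 2 * 2 ^ j := by
    rw [← Nat.pow_succ, ← Nat.pow_add]; congr 1; omega
  rw [h2, Nat.add_comm, Nat.add_mul_div_right _ _ (Nat.two_pow_pos j)]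
  simp only [decide_eq_decide]
  omega

-- pvTemp only looks at bits below lst.length
theorem pvTemp_lowbits (l : List Int) (m m' : Nat)
    (h : ∀ j < l.length, m.testBit j = m'.testBit j) : pvTemp l (↑m) = pvTemp l (↑m') := by
  unfold pvTemp
  apply PySem.List.foldl_congr_mem
  intro acc j hj
  rw [PySem.List.mem_pyRange_one] at hj
  simp only [PySem.List.len_eq] at hj
  have hlt : j.toNat < l.length := by omega
  have hjc : j = ((j.toNat : Nat) : Int) := by omega
  have hc : (PySem.Int.band (↑m) ((1 : Int) <<< j) ≠ 0) =
      (PySem.Int.band (↑m') ((1 : Int) <<< j) ≠ 0) := by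
    rw [hjc]
    apply propext
    rw [pv_bandBit, pv_bandBit, h _ hlt]
  simp only [hc]

theorem pvTemp_append (l : List Int) (x : Int) (i : Int) :
    pvTemp (l ++ [x]) i =
      if PySem.Int.band i ((1 : Int) <<< (l.length : Int)) ≠ 0 then pvTemp l i ++ [x]
      else pvTemp l i := by
  unfold pvTemp
  have hlen : PySem.List.len (l ++ [x]) = (l.length : Int) + 1 := by
    simp [PySem.List.len_eq]
  rw [hlen, PySem.List.pyRange_one_succ_right (by positivity), List.foldl_append]
  simp only [List.foldl_cons, List.foldl_nil]
  have hinner : (PySem.List.pyRange 0 (l.length : Int) 1).foldl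
      (fun temp j =>
        if PySem.Int.band i ((1 : Int) <<< j) ≠ 0 then temp ++ [PySem.List.pyGetD (l ++ [x]) j 0]
        else temp) [] =
      (PySem.List.pyRange 0 (PySem.List.len l) 1).foldl
      (fun temp j =>
        if PySem.Int.band i ((1 : Int) <<< j) ≠ 0 then temp ++ [PySem.List.pyGetD l j 0]
        else temp) [] := by
    simp only [PySem.List.len_eq]
    apply PySem.List.foldl_congr_mem
    intro acc j hj
    rw [PySem.List.mem_pyRange_one] at hj
    have hg : PySem.List.pyGetD (l ++ [x]) j 0 = PySem.List.pyGetD l j 0 := by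
      rw [PySem.List.pyGetD_eq_getElem (h0 := hj.1) (h1 := by simp; omega),
          PySem.List.pyGetD_eq_getElem (h0 := hj.1) (h1 := by omega)]
      exact List.getElem_append_left _
    rw [hg]
  rw [hinner]
  have hget : PySem.List.pyGetD (l ++ [x]) (l.length : Int) 0 = x := by
    simp [List.getD]
  rw [hget]

-- the bitmask enumeration equals the incremental powerset
theorem pv_temps_eq (lst : List Int) :
    (PySem.List.pyRange 0 ((2 : Int) ^ lst.length) 1).map (pvTemp lst) =
      lst.foldl (fun subsets x => subsets ++ subsets.map (fun s => s ++ [x])) [[]] := by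
  induction lst using List.reverseRecOn with
  | nil =>
      have h : ((2 : Int) ^ ([] : List Int).length) = 0 + 1 := by norm_num
      rw [h, PySem.List.pyRange_one_singleton]
      simp [pvTemp, PySem.List.len_eq, PySem.List.pyRange_one_eq_nil]
  | append_singleton l x ih =>
      have hcast : ((2 : Int) ^ l.length) = ((2 ^ l.length : Nat) : Int) := by push_cast; ring
      have h2 : ((2 : Int) ^ (l ++ [x]).length) = (2 : Int) ^ (l.length + 1) := by simp
      rw [h2, PySem.List.pyRange_one_append 0 ((2 : Int) ^ l.length) ((2 : Int) ^ (l.length + 1))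
        (by positivity) (by rw [pow_succ]; nlinarith [pow_pos (by norm_num : (0:Int) < 2) l.length])]
      rw [List.map_append, List.foldl_append]
      simp only [List.foldl_cons, List.foldl_nil]
      have hfirst : (PySem.List.pyRange 0 ((2 : Int) ^ l.length) 1).map (pvTemp (l ++ [x])) =
          (PySem.List.pyRange 0 ((2 : Int) ^ l.length) 1).map (pvTemp l) := by
        apply List.map_congr_left
        intro i hi
        rw [PySem.List.mem_pyRange_one] at hi
        have hm : i = ((i.toNat : Nat) : Int) := by omega
        have hmlt : i.toNat < 2 ^ l.length := by rw [hcast] at hi; omega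
        rw [pvTemp_append, if_neg]
        rw [hm, pv_bandBit]
        simp [Nat.testBit_lt_two_pow hmlt]
      rw [hfirst, ih]
      congr 1
      -- second half: shifted range picks each subset and appends x
      have hN2 : ((2 : Int) ^ (l.length + 1) - (2 : Int) ^ l.length).toNat = 2 ^ l.length := by
        have h : (2 : Int) ^ (l.length + 1) - (2 : Int) ^ l.length = ((2 ^ l.length : Nat) : Int) := by
          push_cast; ring
        rw [h, Int.toNat_natCast]
      have hN1 : ((2 : Int) ^ l.length - 0).toNat = 2 ^ l.length := by rw [sub_zero, hcast]; exact Int.toNat_natCast _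
      rw [← ih, PySem.List.pyRange_one, PySem.List.pyRange_one, hN1, hN2,
          List.map_map, List.map_map, List.map_map]
      apply List.map_congr_left
      intro k hk
      rw [List.mem_range] at hk
      simp only [Function.comp_apply, zero_add]
      have hsum : (2 : Int) ^ l.length + (k : Int) = (((2 ^ l.length + k : Nat) : Nat) : Int) := by
        rw [hcast]; push_cast; ring
      rw [hsum, pvTemp_append, if_pos]
      · rw [pvTemp_lowbits l (2 ^ l.length + k) k (fun j hj => pv_tb_low hj)]
      · rw [pv_bandBit]
        exact pv_tb_high hk

theorem pvCheckLoop_all (seq l : List Int) :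
    pvCheckLoop seq l =
      l.all (fun i => decide (PySem.List.pyGetD seq (i - 1) 0 < PySem.List.pyGetD seq i 0)) := by
  induction l with
  | nil => rfl
  | cons i rest ih =>
      rw [pvCheckLoop, List.all_cons]
      by_cases h : PySem.List.pyGetD seq (i - 1) 0 ≥ PySem.List.pyGetD seq i 0
      · rw [if_pos h]
        have : ¬ (PySem.List.pyGetD seq (i - 1) 0 < PySem.List.pyGetD seq i 0) := by omega
        simp [this]
      · rw [if_neg h, ih]
        have : PySem.List.pyGetD seq (i - 1) 0 < PySem.List.pyGetD seq i 0 := by omega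
        simp [this]

theorem pv_check_eq (seq : List Int) : pvCheckA seq = pvCheckB seq := by
  unfold pvCheckA pvCheckB
  simp only [PySem.List.len_eq]
  by_cases h2 : (seq.length : Int) < 2
  · rw [if_pos h2]
    have : ¬ (2 ≤ seq.length) := by omega
    simp [this]
  · rw [if_neg h2, pvCheckLoop_all]
    have hlen2 : 2 ≤ seq.length := by omega
    simp only [hlen2, decide_true, Bool.true_and]
    rw [Bool.eq_iff_iff]
    simp only [List.all_eq_true]
    constructor
    · intro h p hp
      rw [List.mem_iff_getElem] at hp
      obtain ⟨k, hk, hpk⟩ := hp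
      have hkl : k + 1 < seq.length := by
        simp [List.length_zip, List.length_tail] at hk; omega
      have hmem : ((k : Int) + 1) ∈ PySem.List.pyRange 1 (seq.length : Int) 1 := by
        rw [PySem.List.mem_pyRange_one]; constructor <;> [omega; exact_mod_cast hkl]
      have := h _ hmem
      rw [PySem.List.pyGetD_eq_getElem (h0 := by omega) (h1 := by omega),
          PySem.List.pyGetD_eq_getElem (h0 := by omega) (h1 := by omega)] at this
      rw [← hpk]
      simp only [List.getElem_zip, List.getElem_tail]
      have e1 : ((k : Int) + 1 - 1).toNat = k := by omega
      have e2 : ((k : Int) + 1).toNat = k + 1 := by omega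
      simp only [e1, e2] at this
      exact this
    · intro h i hi
      rw [PySem.List.mem_pyRange_one] at hi
      have hk : i.toNat - 1 < (seq.zip seq.tail).length := by
        simp [List.length_zip, List.length_tail]; omega
      have hp : (seq[i.toNat - 1]'(by simp [List.length_zip, List.length_tail] at hk; omega),
                 seq[i.toNat]'(by omega)) ∈ seq.zip seq.tail := by
        rw [List.mem_iff_getElem]
        refine ⟨i.toNat - 1, hk, ?_⟩
        simp only [List.getElem_zip, List.getElem_tail]
        congr 2
        omega
      have := h _ hp
      simp only [decide_eq_true_eq] at this
      rw [PySem.List.pyGetD_eq_getElem (h0 := by omega) (h1 := by omega),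
          PySem.List.pyGetD_eq_getElem (h0 := by omega) (h1 := by omega)]
      simp only [decide_eq_true_eq]
      have e1 : (i - 1).toNat = i.toNat - 1 := by omega
      simp only [e1]
      exact this


theorem pv_generate_filter (lst : List Int) :
    generate lst = ((PySem.List.pyRange 0 ((2 : Int) ^ lst.length) 1).map (pvTemp lst)).filter pvCheckA := by
  unfold generate
  simp only [PySem.List.len_eq, Int.toNat_natCast]
  rw [PySem.List.foldl_append_if (p := fun t => pvCheckA (pvTemp lst t)) (f := pvTemp lst)]
  rw [List.nil_append, List.filter_map]
  rfl

-- ===== VERDICT (by name: the statement is the Claim_ definition above) =====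
theorem generate_spec : Claim_equal_generate := by
  intro lst _
  unfold Spec_generate generate_alt
  rw [pv_generate_filter, pv_temps_eq, List.filter_congr (fun s _ => pv_check_eq s)]
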